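-- pv_equiv track=rewrite | github.com/benxiao/arxiv | data_preparing.py | merge_adjacent_components_of_same_type
-- ===== SOURCE A (Python) =====
-- NOUN_TYPES = ('NN','NNS','NNP','NNPS')
--
-- def merge_adjacent_components_of_same_type(sent_components):
--     prev = None
--     merged = []
--     for w, t in sent_components:
--         if prev in NOUN_TYPES and t in NOUN_TYPES:
--             last = merged[-1]
--             new_word = last[0] + '_' + w
--             merged[-1] = (new_word, t)
--
--         elif prev == 'JJ' and t in NOUN_TYPES:
--             last = merged[-1]
--
--             new_word = last[0] + '_' + w
--             merged[-1] = (new_word, t)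
--
--         else:
--             merged.append((w,t))
--
--         prev = t
--
--     return merged
-- ===== SOURCE B (Python) =====
-- NOUN_TYPES = ('NN','NNS','NNP','NNPS')
--
-- def merge_adjacent_components_of_same_type(sent_components):
--     # pass 1: partition into runs; a token extends the current run exactly when
--     # it is a noun and the previous raw type was a noun or 'JJ'
--     runs = []
--     prev = None
--     for w, t in sent_components:
--         if runs and t in NOUN_TYPES and (prev in NOUN_TYPES or prev == 'JJ'):
--             runs[-1].append((w, t))
--         else:
--             runs.append([(w, t)])
--         prev = t
--     # pass 2: render each run as its words joined by '_' with the last token's type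
--     return [('_'.join(w for w, _ in run), run[-1][1]) for run in runs]
-- ===== Notes on version B (the rewrite author's own statement) =====
-- stated objective: alternative
-- what changed: Replaces A's single loop that rewrites merged[-1] in place with a two-pass partition-then-join: first split the tokens into runs by a boundary test on consecutive raw types, then render each run as ('_'.join(words), last type).
import Mathlib
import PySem

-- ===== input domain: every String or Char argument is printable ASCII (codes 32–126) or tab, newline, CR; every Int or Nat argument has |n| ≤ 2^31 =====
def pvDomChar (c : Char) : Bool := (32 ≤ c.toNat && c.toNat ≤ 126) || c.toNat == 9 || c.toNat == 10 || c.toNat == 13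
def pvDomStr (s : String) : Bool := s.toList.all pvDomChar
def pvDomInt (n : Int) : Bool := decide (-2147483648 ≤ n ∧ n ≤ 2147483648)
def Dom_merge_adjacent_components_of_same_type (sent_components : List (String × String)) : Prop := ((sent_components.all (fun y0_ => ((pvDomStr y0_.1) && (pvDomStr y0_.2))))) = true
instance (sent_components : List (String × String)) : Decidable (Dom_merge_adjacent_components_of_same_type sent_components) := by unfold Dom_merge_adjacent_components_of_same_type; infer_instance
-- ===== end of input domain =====

-- B replaces A's single loop that rewrites merged[-1] in place by a two-pass
-- partition-into-runs-then-join decomposition (same cost, alternative structure).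

-- ===== PORT A =====
def NOUN_TYPES : List String := ["NN", "NNS", "NNP", "NNPS"]

-- Python's `prev in NOUN_TYPES` where prev may still be None
def prevInNoun (prev : Option String) : Bool :=
  match prev with
  | some p => NOUN_TYPES.contains p
  | none => false

-- the for-loop of A; state = (prev, merged). merged[-1]: merged is nonempty
-- whenever a merge branch fires (prev ≠ None there), so the getD default is unreachable.
def mergeLoopA : Option String → List (String × String) → List (String × String) → List (String × String)
  | _, merged, [] => merged
  | prev, merged, (w, t) :: rest =>
    if prevInNoun prev && NOUN_TYPES.contains t then
      let last := merged.getLast?.getD ("", "")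
      mergeLoopA (some t) (merged.dropLast ++ [(last.1 ++ "_" ++ w, t)]) rest
    else if (prev == some "JJ") && NOUN_TYPES.contains t then
      let last := merged.getLast?.getD ("", "")
      mergeLoopA (some t) (merged.dropLast ++ [(last.1 ++ "_" ++ w, t)]) rest
    else
      mergeLoopA (some t) (merged ++ [(w, t)]) rest

def merge_adjacent_components_of_same_type (sent_components : List (String × String)) : List (String × String) :=
  mergeLoopA none [] sent_components

-- ===== PORT B =====
-- B: pass 1 splits the tokens into runs (boundary test on consecutive raw types),
-- pass 2 renders each run as ('_'.join(words), type of last token).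
def splitRuns : Option String → List (List (String × String)) → List (String × String) → List (List (String × String))
  | _, runs, [] => runs
  | prev, runs, (w, t) :: rest =>
    if !runs.isEmpty && NOUN_TYPES.contains t && (prevInNoun prev || prev == some "JJ") then
      splitRuns (some t) (runs.dropLast ++ [runs.getLast?.getD [] ++ [(w, t)]]) rest
    else
      splitRuns (some t) (runs ++ [[(w, t)]]) rest

def renderRun (run : List (String × String)) : String × String :=
  (PySem.Str.join "_" (run.map Prod.fst), (run.getLast?.getD ("", "")).2)

def merge_adjacent_components_of_same_type_alt (sent_components : List (String × String)) : List (String × String) :=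
  (splitRuns none [] sent_components).map renderRun

-- ===== PRECONDITION & SPEC =====
def Spec_merge_adjacent_components_of_same_type (sent_components : List (String × String)) (out : List (String × String)) : Prop := out = merge_adjacent_components_of_same_type_alt sent_components
instance (sent_components : List (String × String)) (out : List (String × String)) : Decidable (Spec_merge_adjacent_components_of_same_type sent_components out) := by unfold Spec_merge_adjacent_components_of_same_type; infer_instance

-- ===== CLAIM (what is proved, stated in full; the proofs are below) =====
def Claim_equal_merge_adjacent_components_of_same_type : Prop := ∀ (sent_components : List (String × String)), Dom_merge_adjacent_components_of_same_type sent_components → Spec_merge_adjacent_components_of_same_type sent_components (merge_adjacent_components_of_same_type sent_components)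

-- ===== LEMMAS AND PROOFS =====

-- '_'.join on a singleton is the word itself
lemma str_join_singleton (w : String) : PySem.Str.join "_" [w] = w := by
  simp [PySem.Str.join, PySem.Chars.join_singleton]

-- '_'.join over ws ++ [w] appends "_" ++ w when ws is nonempty
lemma str_join_append (ws : List String) (w : String) (h : ws ≠ []) :
    PySem.Str.join "_" (ws ++ [w]) = PySem.Str.join "_" ws ++ "_" ++ w := by
  apply String.toList_injective
  simp only [PySem.Str.toList_join, List.map_append, List.map_cons, List.map_nil,
    String.toList_append]
  induction ws with
  | nil => exact absurd rfl h
  | cons a tl ih =>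
    cases tl with
    | nil => simp [PySem.Chars.join_singleton, PySem.Chars.join_cons_cons]
    | cons b tl' =>
      have := ih (by simp)
      simp only [List.map_cons, List.cons_append] at this ⊢
      rw [PySem.Chars.join_cons_cons, PySem.Chars.join_cons_cons, this]
      simp

-- rendering a run extended by one token appends "_" ++ w and retypes to t
lemma renderRun_extend (r : List (String × String)) (w t : String) (h : r ≠ []) :
    renderRun (r ++ [(w, t)]) = ((renderRun r).1 ++ "_" ++ w, t) := by
  unfold renderRun
  rw [List.map_append]
  simp only [List.map_cons, List.map_nil]
  rw [str_join_append _ _ (by simpa using h)]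
  simp

-- main invariant: A's loop on the rendered runs equals rendering B's split
lemma loop_eq (rest : List (String × String)) :
    ∀ (prev : Option String) (runs : List (List (String × String))),
    (∀ r ∈ runs, r ≠ []) → (runs = [] → prev = none) →
    mergeLoopA prev (runs.map renderRun) rest = (splitRuns prev runs rest).map renderRun := by
  induction rest with
  | nil => intro prev runs _ _; simp [mergeLoopA, splitRuns]
  | cons p rest ih =>
    rintro prev runs hne hemp
    obtain ⟨w, t⟩ := p
    have hrecNew := ih (some t) (runs ++ [[(w, t)]])
      (by intro r' hr'
          rcases List.mem_append.mp hr' with h | h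
          · exact hne r' h
          · simp only [List.mem_singleton] at h; subst h; simp)
      (by simp)
    have hstateNew : (runs.map renderRun) ++ [(w, t)] = (runs ++ [[(w, t)]]).map renderRun := by
      rw [List.map_append]
      simp [renderRun, str_join_singleton]
    by_cases ht : NOUN_TYPES.contains t = true
    · by_cases hor : (prevInNoun prev || prev == some "JJ") = true
      · -- merge step
        have hprev : prev ≠ none := by
          rcases (Bool.or_eq_true _ _).mp hor with h1 | h1 <;>
            · intro hn; subst hn; simp [prevInNoun] at h1
        have hruns : runs ≠ [] := fun h => hprev (hemp h)
        have hE : runs.isEmpty = false := by simpa [List.isEmpty_iff] using hruns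
        obtain ⟨r, hr⟩ : ∃ r, runs.getLast? = some r := by
          cases hgl : runs.getLast? with
          | none => exact absurd (List.getLast?_eq_none_iff.mp hgl) hruns
          | some r => exact ⟨r, rfl⟩
        have hrne : r ≠ [] := hne r (List.mem_of_getLast? hr)
        have hstateA :
            (runs.map renderRun).dropLast ++
              [(((runs.map renderRun).getLast?.getD ("", "")).1 ++ "_" ++ w, t)] =
            (runs.dropLast ++ [runs.getLast?.getD [] ++ [(w, t)]]).map renderRun := by
          rw [List.map_append, List.map_dropLast, List.getLast?_map, hr]
          simp only [Option.map_some, Option.getD_some, List.map_cons, List.map_nil]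
          rw [renderRun_extend r w t hrne]
        have hrecM := ih (some t) (runs.dropLast ++ [runs.getLast?.getD [] ++ [(w, t)]])
          (by intro r' hr'
              rcases List.mem_append.mp hr' with h | h
              · exact hne r' (List.dropLast_subset _ h)
              · simp only [List.mem_singleton] at h; subst h; simp)
          (by simp)
        by_cases hn : prevInNoun prev = true
        · simp only [mergeLoopA, splitRuns, hn, ht, hE, Bool.true_and, Bool.and_true,
            Bool.and_self, Bool.not_false, if_true]
          rw [hstateA]; exact hrecM
        · have hj : (prev == some "JJ") = true := by
            rcases (Bool.or_eq_true _ _).mp hor with h1 | h1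
            · exact absurd h1 hn
            · exact h1
          have hn' : prevInNoun prev = false := by simpa using hn
          simp only [mergeLoopA, splitRuns, hn', hj, ht, hE, Bool.true_and, Bool.and_true,
            Bool.not_false, if_true, if_false, Bool.false_eq_true]
          rw [hstateA]; exact hrecM
      · -- boundary: neither A branch fires, B starts a new run
        obtain ⟨hn, hj⟩ : prevInNoun prev = false ∧ (prev == some "JJ") = false :=
          (Bool.or_eq_false_iff).mp (by simpa using hor)
        simp only [mergeLoopA, splitRuns, hn, hj, ht, Bool.false_and, Bool.and_false,
          Bool.or_self, if_false, Bool.false_eq_true]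
        rw [hstateNew]; exact hrecNew
    · -- t not a noun: new run
      have ht' : NOUN_TYPES.contains t = false := by simpa using ht
      simp only [mergeLoopA, splitRuns, ht', Bool.and_false, Bool.false_and, if_false,
        Bool.false_eq_true]
      rw [hstateNew]; exact hrecNew

-- ===== VERDICT (by name: the statement is the Claim_ definition above) =====
theorem merge_adjacent_components_of_same_type_spec : Claim_equal_merge_adjacent_components_of_same_type := by
  intro sc _
  unfold Spec_merge_adjacent_components_of_same_type
  unfold merge_adjacent_components_of_same_type merge_adjacent_components_of_same_type_alt
  simpa using loop_eq sc none [] (by simp) (fun _ => rfl)
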